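-- pv_equiv track=rewrite | github.com/ksh0414/cotest | implement/imlement10.py | solution
-- ===== SOURCE A (Python) =====
-- def solution(key, lock):
--     def turn(arr, l):
--         tmp = [[0] * l for _ in range(l)]
--         for i in range(l):
--             for j in range(l):
--                 tmp[j][l-i-1] = arr[i][j]
--         return tmp
--
--     def check(key, lock):
--         l = len(lock)
--         for i in range(l):
--             for j in range(l):
--                 if lock[i][j] + key[i][j] != 1:
--                     return False
--         return True
--
--     kl, ll = len(key), len(lock)
--     board = [[0]*(3*ll) for _ in range(3*ll)]
--     for x in range(4):
--         for i in range(ll,kl+ll):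
--             for j in range(ll, kl+ll):
--                 board[i][j] = key[i%ll][j%ll]
--         for r in range(1, ll+kl):
--             for c in range(1, ll+kl):
--                 tmp = []
--                 for i in range(ll):
--                     tmp.append(board[r+i][c:c+ll])
--                 if check(tmp, lock):
--                     return True
--         key = turn(key, kl)
--     return False
-- ===== SOURCE B (Python) =====
-- def solution(key, lock):
--     kl, ll = len(key), len(lock)
--     need = {}
--     for i in range(ll):
--         for j in range(ll):
--             if lock[i][j] != 1:
--                 need[(i, j)] = 1 - lock[i][j]
--     rot = [[key[p][q] for q in range(kl)] for p in range(kl)]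
--     for _ in range(4):
--         pts = [(p, q, rot[p][q]) for p in range(kl) for q in range(kl) if rot[p][q] != 0]
--         for dr in range(1 - kl, ll):
--             for dc in range(1 - kl, ll):
--                 if all(0 <= i - dr < kl and 0 <= j - dc < kl and rot[i - dr][j - dc] == v
--                        for (i, j), v in need.items()) \
--                    and all(not (0 <= p + dr < ll and 0 <= q + dc < ll)
--                            or need.get((p + dr, q + dc)) == v
--                            for p, q, v in pts):
--                     return True
--         rot = [[rot[kl - 1 - q][p] for q in range(kl)] for p in range(kl)]
--     return False
-- ===== Notes on version B (the rewrite author's own statement) =====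
-- stated objective: faster
-- what changed: Replaces A's 3l-by-3l padded board with per-offset window slicing and full-grid rescans by a sparse coordinate-set match: the lock cells still needing a value are collected once into a dict, and each rotation/offset is tested by matching those cells against the rotated key (early exit on the first mismatch) and the nonzero key cells against the dict, with no board and no slicing.
-- outside the precondition, e.g. on solution([[1]], [[0, 0], [0]]): A returns False, B raises IndexError
import Mathlib
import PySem

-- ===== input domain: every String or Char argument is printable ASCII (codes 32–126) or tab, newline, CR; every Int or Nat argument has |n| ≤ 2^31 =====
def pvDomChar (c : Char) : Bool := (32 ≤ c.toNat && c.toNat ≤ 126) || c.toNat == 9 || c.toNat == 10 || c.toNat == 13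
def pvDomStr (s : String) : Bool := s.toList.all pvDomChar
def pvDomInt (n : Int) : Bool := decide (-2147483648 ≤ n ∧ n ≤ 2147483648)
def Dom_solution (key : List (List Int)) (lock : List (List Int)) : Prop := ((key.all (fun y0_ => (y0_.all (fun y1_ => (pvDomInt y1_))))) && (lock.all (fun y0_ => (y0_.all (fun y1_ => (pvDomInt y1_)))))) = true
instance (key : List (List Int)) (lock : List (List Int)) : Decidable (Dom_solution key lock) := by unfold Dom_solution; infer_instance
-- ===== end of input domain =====

-- B replaces A's padded 3l×3l board, window slicing and dense per-offset rescans by a sparse coordinate match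
-- of the nonzero key cells against a dict of the lock cells still needing a value (objective: faster, as measured).

-- ===== PORT A =====
-- m[i][j] with nonnegative indices; total via defaults, exact wherever Python's indexing is in range
-- (which Pre_solution guarantees for every access A performs).
def cellA (m : List (List Int)) (i j : Nat) : Int := (m.getD i []).getD j 0

-- m[i][j] = v (in range under Pre_solution; Lean's set is a no-op out of range where Python would raise)
def setA (m : List (List Int)) (i j : Nat) (v : Int) : List (List Int) :=
  m.set i ((m.getD i []).set j v)

def turnA (arr : List (List Int)) (l : Nat) : List (List Int) :=
  (List.range l).foldl
    (fun tmp i => (List.range l).foldl (fun tmp j => setA tmp j (l - i - 1) (cellA arr i j)) tmp)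
    (List.replicate l (List.replicate l 0))

def checkA (k lock : List (List Int)) : Bool :=
  (List.range lock.length).all fun i => (List.range lock.length).all fun j =>
    cellA lock i j + cellA k i j == 1

def fillA (board key : List (List Int)) (kl ll : Nat) : List (List Int) :=
  (List.range' ll kl).foldl
    (fun b i => (List.range' ll kl).foldl (fun b j => setA b i j (cellA key (i % ll) (j % ll))) b)
    board

def winA (board lock : List (List Int)) (kl ll : Nat) : Bool :=
  (List.range' 1 (ll + kl - 1)).any fun r =>
    (List.range' 1 (ll + kl - 1)).any fun c =>
      checkA ((List.range ll).map fun i =>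
        PySem.List.slice (board.getD (r + i) []) (some (c : Int)) (some ((c : Int) + (ll : Int)))) lock

def goA (lock : List (List Int)) (kl ll : Nat) : Nat → List (List Int) → List (List Int) → Bool
  | 0, _, _ => false
  | n + 1, key, board =>
    let b2 := fillA board key kl ll
    if winA b2 lock kl ll then true else goA lock kl ll n (turnA key kl) b2

def solution (key : List (List Int)) (lock : List (List Int)) : Bool :=
  goA lock key.length lock.length 4 key
    (List.replicate (3 * lock.length) (List.replicate (3 * lock.length) 0))

-- ===== PORT B =====
-- m[i][j] for Python int indices; B only evaluates it after checking 0 ≤ i < len(m) etc., where it is exact.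
def cellB (m : List (List Int)) (i j : Int) : Int := (m.getD i.toNat []).getD j.toNat 0

def needB (lock : List (List Int)) (ll : Int) : PySem.Dict (Int × Int) Int :=
  (PySem.List.pyRange 0 ll 1).foldl
    (fun d i => (PySem.List.pyRange 0 ll 1).foldl
      (fun d j => if cellB lock i j ≠ 1 then d.insert (i, j) (1 - cellB lock i j) else d) d)
    PySem.Dict.empty

def ptsB (rot : List (List Int)) (kl : Int) : List (Int × Int × Int) :=
  (PySem.List.pyRange 0 kl 1).flatMap fun p =>
    ((PySem.List.pyRange 0 kl 1).map fun q => (p, q, cellB rot p q)).filter fun t => t.2.2 != 0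

def okB (need : PySem.Dict (Int × Int) Int) (rot : List (List Int)) (pts : List (Int × Int × Int))
    (kl ll dr dc : Int) : Bool :=
  (need.items.all fun kv =>
    decide (0 ≤ kv.1.1 - dr) && decide (kv.1.1 - dr < kl) && decide (0 ≤ kv.1.2 - dc) && decide (kv.1.2 - dc < kl) &&
      (cellB rot (kv.1.1 - dr) (kv.1.2 - dc) == kv.2)) &&
  (pts.all fun t =>
    !(decide (0 ≤ t.1 + dr) && decide (t.1 + dr < ll) && decide (0 ≤ t.2.1 + dc) && decide (t.2.1 + dc < ll)) ||
      (need.get? (t.1 + dr, t.2.1 + dc) == some t.2.2))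

def rotB (rot : List (List Int)) (kl : Int) : List (List Int) :=
  (PySem.List.pyRange 0 kl 1).map fun p => (PySem.List.pyRange 0 kl 1).map fun q => cellB rot (kl - 1 - q) p

def goB (need : PySem.Dict (Int × Int) Int) (kl ll : Int) : Nat → List (List Int) → Bool
  | 0, _ => false
  | n + 1, rot =>
    if (PySem.List.pyRange (1 - kl) ll 1).any fun dr =>
         (PySem.List.pyRange (1 - kl) ll 1).any fun dc => okB need rot (ptsB rot kl) kl ll dr dc
    then true else goB need kl ll n (rotB rot kl)

def solution_alt (key : List (List Int)) (lock : List (List Int)) : Bool :=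
  goB (needB lock lock.length) key.length lock.length 4
    ((PySem.List.pyRange 0 key.length 1).map fun p =>
      (PySem.List.pyRange 0 key.length 1).map fun q => cellB key p q)

-- ===== PRECONDITION & SPEC =====
-- Pre_solution restricts to the problem's natural domain (a square key no larger than the square lock; rows may
-- carry extra trailing entries, which A never reads): outside it A raises IndexError on most inputs, and where it
-- still returns a value that value is an artefact of its board indexing (a key larger than the lock is read
-- wrapped modulo the lock size; a ragged lock may be only half-read before an early exit).
def Pre_solution (key : List (List Int)) (lock : List (List Int)) : Prop :=
  key.length ≤ lock.length ∧ (∀ r ∈ key, key.length ≤ r.length) ∧ (∀ r ∈ lock, lock.length ≤ r.length)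
instance (key : List (List Int)) (lock : List (List Int)) : Decidable (Pre_solution key lock) := by
  unfold Pre_solution; infer_instance

def pvWitness_solution : List (List Int) × List (List Int) := ([[0]], [[1, 0], [0, 1]])

def Spec_solution (key : List (List Int)) (lock : List (List Int)) (out : Bool) : Prop := out = solution_alt key lock
instance (key : List (List Int)) (lock : List (List Int)) (out : Bool) : Decidable (Spec_solution key lock out) := by unfold Spec_solution; infer_instance

-- ===== CLAIM (what is proved, stated in full; the proofs are below) =====
def Claim_equal_solution : Prop := ∀ (key : List (List Int)) (lock : List (List Int)), Dom_solution key lock → Pre_solution key lock → Spec_solution key lock (solution key lock)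

-- ===== LEMMAS AND PROOFS =====

theorem cellA_setA (m : List (List Int)) (i j x y : Nat) (v : Int)
    (hi : i < m.length) (hj : j < (m.getD i []).length) :
    cellA (setA m i j v) x y = if x = i ∧ y = j then v else cellA m x y := by
  unfold cellA setA
  simp only [List.getD_eq_getElem?_getD, List.getElem?_set]
  by_cases hxi : x = i
  · subst hxi
    simp only [hi, if_true]
    rw [List.getD_eq_getElem?_getD] at hj
    by_cases hyj : y = j
    · subst hyj
      simp [hj]
    · simp [hyj, (Ne.symm hyj : j ≠ y)]
  · simp [hxi, (Ne.symm hxi : i ≠ x)]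

theorem length_setA (m : List (List Int)) (i j : Nat) (v : Int) :
    (setA m i j v).length = m.length := by
  simp [setA]

theorem rowlen_setA (m : List (List Int)) (i j x : Nat) (v : Int) :
    ((setA m i j v).getD x []).length = (m.getD x []).length := by
  unfold setA
  simp only [List.getD_eq_getElem?_getD, List.getElem?_set]
  by_cases hix : i = x
  · subst hix
    by_cases hi : i < m.length
    · simp [hi]
    · simp [hi]
  · simp [hix]

-- a fold of in-place cell writes, the common shape of A's fill and turn loops
def setsFold {β : Type} (d : List (List Int)) (l : List β) (pi pj : β → Nat) (pv : β → Int) :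
    List (List Int) :=
  l.foldl (fun b x => setA b (pi x) (pj x) (pv x)) d

theorem length_setsFold {β : Type} (d : List (List Int)) (l : List β) (pi pj : β → Nat) (pv : β → Int) :
    (setsFold d l pi pj pv).length = d.length := by
  induction l generalizing d with
  | nil => rfl
  | cons c t ih => rw [setsFold, List.foldl_cons, ← setsFold, ih, length_setA]

theorem rowlen_setsFold {β : Type} (d : List (List Int)) (l : List β) (pi pj : β → Nat) (pv : β → Int) (x : Nat) :
    ((setsFold d l pi pj pv).getD x []).length = (d.getD x []).length := by
  induction l generalizing d with
  | nil => rfl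
  | cons c t ih => rw [setsFold, List.foldl_cons, ← setsFold, ih, rowlen_setA]

theorem cell_setsFold_of_not_mem {β : Type} (d : List (List Int)) (l : List β) (pi pj : β → Nat)
    (pv : β → Int) (a b : Nat) (h : ∀ x ∈ l, ¬(pi x = a ∧ pj x = b)) :
    cellA (setsFold d l pi pj pv) a b = cellA d a b := by
  induction l generalizing d with
  | nil => rfl
  | cons c t ih =>
    rw [setsFold, List.foldl_cons, ← setsFold, ih _ (fun x hx => h x (List.mem_cons_of_mem _ hx))]
    unfold cellA setA
    have hc := h c (List.mem_cons_self ..)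
    simp only [List.getD_eq_getElem?_getD, List.getElem?_set]
    by_cases hca : pi c = a
    · by_cases hlt : pi c < d.length
      · subst hca
        simp only [hlt, if_true]
        rw [List.getElem?_eq_getElem hlt]
        simp only [Option.getD_some]
        rw [List.getElem?_set]
        have : ¬ pj c = b := fun hb => hc ⟨rfl, hb⟩
        simp [this]
      · subst hca
        simp [hlt]
    · simp [hca]

theorem cell_setsFold_of_mem {β : Type} (d : List (List Int)) (l : List β) (pi pj : β → Nat)
    (pv : β → Int) (a b : Nat) (x : β) (hx : x ∈ l) (hpi : pi x = a) (hpj : pj x = b)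
    (hval : ∀ x' ∈ l, pi x' = a → pj x' = b → pv x' = pv x)
    (hin : ∀ x' ∈ l, pi x' < d.length ∧ pj x' < (d.getD (pi x') []).length) :
    cellA (setsFold d l pi pj pv) a b = pv x := by
  induction l generalizing d x with
  | nil => exact absurd hx (List.not_mem_nil)
  | cons c t ih =>
    rw [setsFold, List.foldl_cons, ← setsFold]
    have hin' : ∀ x' ∈ t, pi x' < (setA d (pi c) (pj c) (pv c)).length ∧
        pj x' < ((setA d (pi c) (pj c) (pv c)).getD (pi x') []).length := by
      intro x' hx'
      rw [length_setA, rowlen_setA]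
      exact hin x' (List.mem_cons_of_mem _ hx')
    by_cases hex : ∃ x' ∈ t, pi x' = a ∧ pj x' = b
    · obtain ⟨x', hx't, hx'a, hx'b⟩ := hex
      rw [ih _ x' hx't hx'a hx'b
        (fun z hz hza hzb => by
          rw [hval z (List.mem_cons_of_mem _ hz) hza hzb,
            hval x' (List.mem_cons_of_mem _ hx't) hx'a hx'b])
        hin']
      exact hval x' (List.mem_cons_of_mem _ hx't) hx'a hx'b
    · have hnm : ∀ z ∈ t, ¬(pi z = a ∧ pj z = b) := by
        intro z hz hzz
        exact hex ⟨z, hz, hzz.1, hzz.2⟩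
      rw [cell_setsFold_of_not_mem _ _ _ _ _ _ _ hnm]
      have hxc : x = c ∨ x ∈ t := List.mem_cons.mp hx
      have hxc' : pi c = a ∧ pj c = b := by
        rcases hxc with h1 | h1
        · subst h1; exact ⟨hpi, hpj⟩
        · exact absurd ⟨hpi, hpj⟩ (hnm x h1)
      obtain ⟨hca, hcb⟩ := hxc'
      have hinc := hin c (List.mem_cons_self ..)
      rw [cellA_setA _ _ _ _ _ _ hinc.1 hinc.2, if_pos ⟨hca.symm, hcb.symm⟩]
      exact hval c (List.mem_cons_self ..) hca hcb

theorem nested_foldl_eq_setsFold (d : List (List Int)) (l₁ l₂ : List Nat)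
    (pi pj : Nat → Nat → Nat) (pv : Nat → Nat → Int) :
    l₁.foldl (fun b i => l₂.foldl (fun b j => setA b (pi i j) (pj i j) (pv i j)) b) d
      = setsFold d (l₁.flatMap fun i => l₂.map fun j => (i, j))
          (fun x => pi x.1 x.2) (fun x => pj x.1 x.2) (fun x => pv x.1 x.2) := by
  induction l₁ generalizing d with
  | nil => rfl
  | cons c t ih =>
    rw [List.foldl_cons, ih, List.flatMap_cons]
    unfold setsFold
    rw [List.foldl_append, List.foldl_map]

-- shape invariant of A's board
def BoardOK (board : List (List Int)) (kl ll : Nat) : Prop :=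
  board.length = 3 * ll ∧ (∀ x, x < 3 * ll → (board.getD x []).length = 3 * ll) ∧
    ∀ a b : Nat, ¬(ll ≤ a ∧ a < ll + kl ∧ ll ≤ b ∧ b < ll + kl) → cellA board a b = 0

theorem cell_replicate_zero (n a b : Nat) :
    cellA (List.replicate n (List.replicate n (0 : Int))) a b = 0 := by
  unfold cellA
  simp only [List.getD_eq_getElem?_getD, List.getElem?_replicate]
  split_ifs <;> simp

theorem boardOK_init (kl ll : Nat) :
    BoardOK (List.replicate (3 * ll) (List.replicate (3 * ll) 0)) kl ll := by
  refine ⟨List.length_replicate, fun x hx => ?_, fun a b _ => cell_replicate_zero _ a b⟩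
  rw [List.getD_eq_getElem?_getD, List.getElem?_replicate, if_pos hx]
  exact List.length_replicate

theorem cell_fillA (board key : List (List Int)) (kl ll : Nat) (hkl : kl ≤ ll)
    (hlen : board.length = 3 * ll) (hrow : ∀ x, x < 3 * ll → (board.getD x []).length = 3 * ll)
    (a b : Nat) :
    cellA (fillA board key kl ll) a b =
      if ll ≤ a ∧ a < ll + kl ∧ ll ≤ b ∧ b < ll + kl then cellA key (a - ll) (b - ll)
      else cellA board a b := by
  have hmod : ∀ i : Nat, ll ≤ i → i < ll + kl → i % ll = i - ll := by
    intro i h1 h2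
    rw [Nat.mod_eq_sub_mod h1]
    exact Nat.mod_eq_of_lt (by omega)
  unfold fillA
  rw [nested_foldl_eq_setsFold]
  by_cases hreg : ll ≤ a ∧ a < ll + kl ∧ ll ≤ b ∧ b < ll + kl
  · obtain ⟨h1, h2, h3, h4⟩ := hreg
    have hll : 1 ≤ ll := by omega
    have hmem : (a, b) ∈ (List.range' ll kl).flatMap fun i => (List.range' ll kl).map fun j => (i, j) := by
      simp only [List.mem_flatMap, List.mem_map, List.mem_range'_1]
      exact ⟨a, ⟨h1, by omega⟩, b, ⟨h3, by omega⟩, rfl⟩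
    rw [cell_setsFold_of_mem _ _ _ _ _ _ _ (a, b) hmem rfl rfl
      (fun x' _ ha' hb' => by rw [ha', hb'])
      (fun x' hx' => by
        simp only [List.mem_flatMap, List.mem_map, List.mem_range'_1] at hx'
        obtain ⟨i, hi, j, hj, hx'⟩ := hx'
        subst hx'
        constructor
        · simp only [hlen]; omega
        · rw [hrow i (by omega)]; omega)]
    simp only
    rw [hmod a h1 h2, hmod b h3 h4, if_pos ⟨h1, h2, h3, h4⟩]
  · rw [cell_setsFold_of_not_mem, if_neg hreg]
    intro x hx hab
    simp only [List.mem_flatMap, List.mem_map, List.mem_range'_1] at hx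
    obtain ⟨i, hi, j, hj, hx⟩ := hx
    subst hx
    obtain ⟨ha, hb⟩ := hab
    simp only at ha hb
    subst ha; subst hb
    exact hreg ⟨hi.1, by omega, hj.1, by omega⟩

theorem boardOK_fillA (board key : List (List Int)) (kl ll : Nat) (hkl : kl ≤ ll)
    (h : BoardOK board kl ll) : BoardOK (fillA board key kl ll) kl ll := by
  obtain ⟨hl, hr, hz⟩ := h
  refine ⟨?_, fun x hx => ?_, fun a b hab => ?_⟩
  · unfold fillA
    rw [nested_foldl_eq_setsFold, length_setsFold]
    exact hl
  · unfold fillA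
    rw [nested_foldl_eq_setsFold, rowlen_setsFold]
    exact hr x hx
  · rw [cell_fillA board key kl ll hkl hl hr, if_neg hab]
    exact hz a b hab

theorem cell_turnA (arr : List (List Int)) (l a b : Nat) (ha : a < l) (hb : b < l) :
    cellA (turnA arr l) a b = cellA arr (l - 1 - b) a := by
  unfold turnA
  rw [nested_foldl_eq_setsFold]
  have hmem : (l - 1 - b, a) ∈ (List.range l).flatMap fun i => (List.range l).map fun j => (i, j) := by
    simp only [List.mem_flatMap, List.mem_map, List.mem_range]
    exact ⟨l - 1 - b, by omega, a, ha, rfl⟩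
  rw [cell_setsFold_of_mem _ _ _ _ _ _ _ (l - 1 - b, a) hmem rfl (by simp only; omega)
    (fun x' hx' ha' hb' => by
      simp only [List.mem_flatMap, List.mem_map, List.mem_range] at hx'
      obtain ⟨i, hi, j, hj, hx'⟩ := hx'
      subst hx'
      simp only at ha' hb' ⊢
      have : i = l - 1 - b := by omega
      rw [this, ha'])
    (fun x' hx' => by
      simp only [List.mem_flatMap, List.mem_map, List.mem_range] at hx'
      obtain ⟨i, hi, j, hj, hx'⟩ := hx'
      subst hx'
      refine ⟨by simpa using hj, ?_⟩
      rw [List.getD_eq_getElem?_getD, List.getElem?_replicate, if_pos hj]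
      simp only [Option.getD_some, List.length_replicate]
      omega)]

-- the common meaning of one placement test: key (as matrix K) shifted by (dr, dc) fills lock exactly
def Fits (K lock : List (List Int)) (kl ll : Nat) (dr dc : Int) : Prop :=
  ∀ i j : Nat, i < ll → j < ll →
    cellA lock i j +
      (if 0 ≤ (i : Int) - dr ∧ (i : Int) - dr < (kl : Int) ∧ 0 ≤ (j : Int) - dc ∧ (j : Int) - dc < (kl : Int)
       then cellB K ((i : Int) - dr) ((j : Int) - dc) else 0) = 1

theorem checkA_window (board key lock : List (List Int)) (kl ll r c : Nat) (hkl : kl ≤ ll)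
    (hll : lock.length = ll) (hB : BoardOK board kl ll)
    (hcell : ∀ a b : Nat, cellA board a b =
      if ll ≤ a ∧ a < ll + kl ∧ ll ≤ b ∧ b < ll + kl then cellA key (a - ll) (b - ll) else 0)
    (hr : 1 ≤ r ∧ r < ll + kl) (_hc : 1 ≤ c ∧ c < ll + kl) :
    checkA ((List.range ll).map fun i =>
        PySem.List.slice (board.getD (r + i) []) (some (c : Int)) (some ((c : Int) + (ll : Int)))) lock
      = true ↔ Fits key lock kl ll ((ll : Int) - (r : Int)) ((ll : Int) - (c : Int)) := by
  have hterm : ∀ i j : Nat, i < ll → j < ll →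
      cellA ((List.range ll).map fun i =>
        PySem.List.slice (board.getD (r + i) []) (some (c : Int)) (some ((c : Int) + (ll : Int)))) i j
      = (if 0 ≤ (i : Int) - ((ll : Int) - (r : Int)) ∧ (i : Int) - ((ll : Int) - (r : Int)) < (kl : Int) ∧
            0 ≤ (j : Int) - ((ll : Int) - (c : Int)) ∧ (j : Int) - ((ll : Int) - (c : Int)) < (kl : Int)
         then cellB key ((i : Int) - ((ll : Int) - (r : Int))) ((j : Int) - ((ll : Int) - (c : Int))) else 0) := by
    intro i j hi hj
    have hrow : (board.getD (r + i) []).length = 3 * ll := hB.2.1 _ (by omega)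
    unfold cellA
    rw [PySem.List.getD_map_range _ _ _ _ hi, PySem.List.slice_natCast_add]
    rw [List.getD_eq_getElem?_getD, List.getElem?_take, if_pos hj, List.getElem?_drop,
      ← List.getD_eq_getElem?_getD]
    have : (board.getD (r + i) []).getD (c + j) 0 = cellA board (r + i) (c + j) := rfl
    rw [this, hcell]
    by_cases hreg : ll ≤ r + i ∧ r + i < ll + kl ∧ ll ≤ c + j ∧ c + j < ll + kl
    · rw [if_pos hreg, if_pos (by omega)]
      unfold cellB
      congr 1 <;> omega
    · rw [if_neg hreg, if_neg (by omega)]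
  unfold checkA Fits
  rw [hll]
  simp only [List.all_eq_true, List.mem_range, beq_iff_eq]
  constructor
  · intro h i j hi hj
    have := h i hi j hj
    rwa [hterm i j hi hj] at this
  · intro h i hi j hj
    rw [hterm i j hi hj]
    exact h i j hi hj

theorem winA_eq_fits (board key lock : List (List Int)) (kl ll : Nat) (hkl : kl ≤ ll)
    (hll : lock.length = ll) (hB : BoardOK board kl ll)
    (hcell : ∀ a b : Nat, cellA board a b =
      if ll ≤ a ∧ a < ll + kl ∧ ll ≤ b ∧ b < ll + kl then cellA key (a - ll) (b - ll) else 0) :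
    winA board lock kl ll = true ↔
      ∃ dr dc : Int, (1 - (kl : Int) ≤ dr ∧ dr < (ll : Int)) ∧
        (1 - (kl : Int) ≤ dc ∧ dc < (ll : Int)) ∧ Fits key lock kl ll dr dc := by
  unfold winA
  simp only [List.any_eq_true, List.mem_range'_1]
  constructor
  · rintro ⟨r, hr, c, hc, hch⟩
    have hr' : 1 ≤ r ∧ r < ll + kl := by omega
    have hc' : 1 ≤ c ∧ c < ll + kl := by omega
    refine ⟨(ll : Int) - (r : Int), (ll : Int) - (c : Int), by omega, by omega, ?_⟩
    exact (checkA_window board key lock kl ll r c hkl hll hB hcell hr' hc').mp hch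
  · rintro ⟨dr, dc, hdr, hdc, hf⟩
    refine ⟨((ll : Int) - dr).toNat, by omega, ((ll : Int) - dc).toNat, by omega, ?_⟩
    have h1 : 1 ≤ ((ll : Int) - dr).toNat ∧ ((ll : Int) - dr).toNat < ll + kl := by omega
    have h2 : 1 ≤ ((ll : Int) - dc).toNat ∧ ((ll : Int) - dc).toNat < ll + kl := by omega
    rw [checkA_window board key lock kl ll _ _ hkl hll hB hcell h1 h2]
    have e1 : (ll : Int) - (((ll : Int) - dr).toNat : Int) = dr := by omega
    have e2 : (ll : Int) - (((ll : Int) - dc).toNat : Int) = dc := by omega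
    rw [e1, e2]
    exact hf

theorem need_inner_get? (lock : List (List Int)) (i : Int) (js : List Int)
    (d : PySem.Dict (Int × Int) Int) (x y : Int) :
    (js.foldl (fun d j => if cellB lock i j ≠ 1 then d.insert (i, j) (1 - cellB lock i j) else d) d).get? (x, y)
      = if x = i ∧ y ∈ js ∧ cellB lock i y ≠ 1 then some (1 - cellB lock i y)
        else d.get? (x, y) := by
  induction js generalizing d with
  | nil => simp
  | cons j t ih =>
    rw [List.foldl_cons, ih]
    by_cases h1 : x = i ∧ y ∈ t ∧ cellB lock i y ≠ 1
    · rw [if_pos h1, if_pos ⟨h1.1, List.mem_cons_of_mem _ h1.2.1, h1.2.2⟩]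
    · rw [if_neg h1]
      by_cases h2 : cellB lock i j ≠ 1
      · rw [if_pos h2, PySem.Dict.get?_insert]
        by_cases h3 : (x, y) = (i, j)
        · rw [if_pos h3]
          obtain ⟨hx, hy⟩ := Prod.mk.injEq .. ▸ h3
          subst hx; subst hy
          rw [if_pos ⟨rfl, List.mem_cons_self .., h2⟩]
        · rw [if_neg h3, if_neg]
          intro ⟨ha, hb, hc⟩
          rcases List.mem_cons.mp hb with hb' | hb'
          · exact h3 (by rw [ha, hb'])
          · exact h1 ⟨ha, hb', hc⟩
      · rw [if_neg h2, if_neg]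
        intro ⟨ha, hb, hc⟩
        rcases List.mem_cons.mp hb with hb' | hb'
        · exact h2 (hb' ▸ hc)
        · exact h1 ⟨ha, hb', hc⟩

theorem need_outer_get? (lock : List (List Int)) (ll : Int) (is : List Int)
    (d : PySem.Dict (Int × Int) Int) (x y : Int) :
    (is.foldl (fun d i => (PySem.List.pyRange 0 ll 1).foldl
        (fun d j => if cellB lock i j ≠ 1 then d.insert (i, j) (1 - cellB lock i j) else d) d) d).get? (x, y)
      = if x ∈ is ∧ 0 ≤ y ∧ y < ll ∧ cellB lock x y ≠ 1 then some (1 - cellB lock x y)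
        else d.get? (x, y) := by
  induction is generalizing d with
  | nil => simp
  | cons i t ih =>
    rw [List.foldl_cons, ih]
    by_cases h1 : x ∈ t ∧ 0 ≤ y ∧ y < ll ∧ cellB lock x y ≠ 1
    · rw [if_pos h1, if_pos ⟨List.mem_cons_of_mem _ h1.1, h1.2⟩]
    · rw [if_neg h1, need_inner_get?]
      by_cases h2 : x = i ∧ y ∈ PySem.List.pyRange 0 ll 1 ∧ cellB lock i y ≠ 1
      · rw [if_pos h2]
        obtain ⟨hxi, hy, hc⟩ := h2
        subst hxi
        rw [PySem.List.mem_pyRange_one] at hy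
        rw [if_pos ⟨List.mem_cons_self .., hy.1, hy.2, hc⟩]
      · rw [if_neg h2, if_neg]
        intro ⟨ha, hb, hc, hd⟩
        rcases List.mem_cons.mp ha with ha' | ha'
        · exact h2 ⟨ha', PySem.List.mem_pyRange_one.mpr ⟨hb, hc⟩, ha' ▸ hd⟩
        · exact h1 ⟨ha', hb, hc, hd⟩

theorem needB_get? (lock : List (List Int)) (ll : Nat) (x y : Int) :
    (needB lock (ll : Int)).get? (x, y) =
      if 0 ≤ x ∧ x < (ll : Int) ∧ 0 ≤ y ∧ y < (ll : Int) ∧ cellB lock x y ≠ 1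
      then some (1 - cellB lock x y) else none := by
  unfold needB
  rw [need_outer_get?]
  simp only [PySem.List.mem_pyRange_one, PySem.Dict.get?_empty]
  by_cases h : 0 ≤ x ∧ x < (ll : Int) ∧ 0 ≤ y ∧ y < (ll : Int) ∧ cellB lock x y ≠ 1
  · rw [if_pos ⟨⟨h.1, h.2.1⟩, h.2.2⟩, if_pos h]
  · rw [if_neg (fun hh => h ⟨hh.1.1, hh.1.2, hh.2⟩), if_neg h]

theorem dict_nodup_foldl {β : Type} (f : PySem.Dict (Int × Int) Int → β → PySem.Dict (Int × Int) Int)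
    (hf : ∀ d x, d.keys.Nodup → (f d x).keys.Nodup) (l : List β) (d : PySem.Dict (Int × Int) Int)
    (hd : d.keys.Nodup) : (l.foldl f d).keys.Nodup := by
  induction l generalizing d with
  | nil => exact hd
  | cons c t ih => exact ih _ (hf d c hd)

theorem needB_nodup (lock : List (List Int)) (ll : Nat) :
    (needB lock (ll : Int)).keys.Nodup := by
  unfold needB
  refine dict_nodup_foldl _ (fun d i hd => ?_) _ _ (by simp [PySem.Dict.keys_empty])
  refine dict_nodup_foldl _ (fun d j hd => ?_) _ _ hd
  split_ifs with h
  · exact PySem.Dict.nodup_keys_insert _ _ _ hd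
  · exact hd

theorem mem_ptsB (rot : List (List Int)) (kl : Nat) (t : Int × Int × Int) :
    t ∈ ptsB rot (kl : Int) ↔
      (0 ≤ t.1 ∧ t.1 < (kl : Int)) ∧ (0 ≤ t.2.1 ∧ t.2.1 < (kl : Int)) ∧
        t.2.2 = cellB rot t.1 t.2.1 ∧ t.2.2 ≠ 0 := by
  unfold ptsB
  simp only [List.mem_flatMap, List.mem_filter, List.mem_map, PySem.List.mem_pyRange_one,
    bne_iff_ne, ne_eq]
  constructor
  · rintro ⟨p, hp, ⟨q, hq, rfl⟩, hnz⟩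
    exact ⟨hp, hq, rfl, hnz⟩
  · rintro ⟨h1, h2, h3, h4⟩
    obtain ⟨p, q, v⟩ := t
    simp only at h1 h2 h3 h4 ⊢
    subst h3
    exact ⟨p, h1, ⟨q, h2, rfl⟩, h4⟩

theorem cellB_natCast (m : List (List Int)) (i j : Nat) :
    cellB m (i : Int) (j : Int) = cellA m i j := by
  simp [cellA, cellB]

theorem okB_eq_fits (rot lock : List (List Int)) (kl ll : Nat) (dr dc : Int) :
    okB (needB lock (ll : Int)) rot (ptsB rot (kl : Int)) (kl : Int) (ll : Int) dr dc = true ↔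
      Fits rot lock kl ll dr dc := by
  have hitems : ∀ kv : (Int × Int) × Int, kv ∈ (needB lock (ll : Int)).items ↔
      (needB lock (ll : Int)).get? kv.1 = some kv.2 := by
    intro kv
    exact (PySem.Dict.get?_eq_some_iff_mem_items _ _ _ (needB_nodup lock ll)).symm
  unfold okB
  rw [Bool.and_eq_true, List.all_eq_true, List.all_eq_true]
  constructor
  · rintro ⟨h2, h1⟩
    have H1 : ∀ t ∈ ptsB rot (kl : Int),
        (0 ≤ t.1 + dr ∧ t.1 + dr < (ll : Int) ∧ 0 ≤ t.2.1 + dc ∧ t.2.1 + dc < (ll : Int)) →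
        (needB lock (ll : Int)).get? (t.1 + dr, t.2.1 + dc) = some t.2.2 := by
      intro t ht hb
      have h := h1 t ht
      simp only [Bool.or_eq_true, Bool.not_eq_true', Bool.and_eq_false_iff,
        decide_eq_false_iff_not, beq_iff_eq] at h
      rcases h with h | h
      · exact absurd hb (by tauto)
      · exact h
    intro i j hi hj
    by_cases hcl : cellB lock (i : Int) (j : Int) = 1
    · have hc1 : cellA lock i j = 1 := by rw [← cellB_natCast]; exact hcl
      rw [hc1]
      by_cases hcond : 0 ≤ (i : Int) - dr ∧ (i : Int) - dr < (kl : Int) ∧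
          0 ≤ (j : Int) - dc ∧ (j : Int) - dc < (kl : Int)
      · rw [if_pos hcond]
        by_cases hv : cellB rot ((i : Int) - dr) ((j : Int) - dc) = 0
        · rw [hv]; norm_num
        · exfalso
          have ht : ((i : Int) - dr, (j : Int) - dc, cellB rot ((i : Int) - dr) ((j : Int) - dc))
              ∈ ptsB rot (kl : Int) :=
            (mem_ptsB rot kl _).mpr ⟨⟨hcond.1, hcond.2.1⟩, ⟨hcond.2.2.1, hcond.2.2.2⟩, rfl, hv⟩
          have hb : 0 ≤ ((i : Int) - dr) + dr ∧ ((i : Int) - dr) + dr < (ll : Int) ∧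
              0 ≤ ((j : Int) - dc) + dc ∧ ((j : Int) - dc) + dc < (ll : Int) := by omega
          have hg := H1 _ ht hb
          simp only at hg
          rw [show (i : Int) - dr + dr = (i : Int) by ring, show (j : Int) - dc + dc = (j : Int) by ring] at hg
          rw [needB_get?, if_neg (fun hh => hh.2.2.2.2 hcl)] at hg
          simp at hg
      · rw [if_neg hcond]; norm_num
    · have hg : (needB lock (ll : Int)).get? ((i : Int), (j : Int)) =
          some (1 - cellB lock (i : Int) (j : Int)) := by
        rw [needB_get?, if_pos ⟨by omega, by omega, by omega, by omega, hcl⟩]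
      have hkv := h2 (((i : Int), (j : Int)), 1 - cellB lock (i : Int) (j : Int))
        ((hitems _).mpr hg)
      simp only [Bool.and_eq_true, decide_eq_true_eq, beq_iff_eq] at hkv
      obtain ⟨⟨⟨⟨hb1, hb2⟩, hb3⟩, hb4⟩, hcv⟩ := hkv
      rw [if_pos ⟨hb1, hb2, hb3, hb4⟩, ← cellB_natCast, hcv]
      ring
  · intro hf
    constructor
    · intro kv hkv
      obtain ⟨⟨x, y⟩, v⟩ := kv
      have hg := (hitems _).mp hkv
      simp only at hg
      rw [needB_get?] at hg
      by_cases hc : 0 ≤ x ∧ x < (ll : Int) ∧ 0 ≤ y ∧ y < (ll : Int) ∧ cellB lock x y ≠ 1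
      · rw [if_pos hc] at hg
        have hv : v = 1 - cellB lock x y := by
          have := Option.some.inj hg
          omega
        have hi : x.toNat < ll := by omega
        have hj : y.toNat < ll := by omega
        have hfit := hf x.toNat y.toNat hi hj
        have e1 : ((x.toNat : Nat) : Int) = x := by omega
        have e2 : ((y.toNat : Nat) : Int) = y := by omega
        rw [e1, e2] at hfit
        have hlk : cellA lock x.toNat y.toNat = cellB lock x y := by
          rw [← cellB_natCast, e1, e2]
        rw [hlk] at hfit
        simp only [Bool.and_eq_true, decide_eq_true_eq, beq_iff_eq]
        by_cases hcond : 0 ≤ x - dr ∧ x - dr < (kl : Int) ∧ 0 ≤ y - dc ∧ y - dc < (kl : Int)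
        · rw [if_pos hcond] at hfit
          exact ⟨⟨⟨⟨hcond.1, hcond.2.1⟩, hcond.2.2.1⟩, hcond.2.2.2⟩, by omega⟩
        · rw [if_neg hcond] at hfit
          exfalso
          have : cellB lock x y = 1 := by omega
          exact hc.2.2.2.2 this
      · rw [if_neg hc] at hg
        simp at hg
    · intro t ht
      simp only [Bool.or_eq_true, Bool.not_eq_true', Bool.and_eq_false_iff,
        decide_eq_false_iff_not, beq_iff_eq]
      by_cases hb : 0 ≤ t.1 + dr ∧ t.1 + dr < (ll : Int) ∧ 0 ≤ t.2.1 + dc ∧ t.2.1 + dc < (ll : Int)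
      · right
        obtain ⟨hp, hq, hv, hnz⟩ := (mem_ptsB rot kl t).mp ht
        have hi : (t.1 + dr).toNat < ll := by omega
        have hj : (t.2.1 + dc).toNat < ll := by omega
        have hfit := hf (t.1 + dr).toNat (t.2.1 + dc).toNat hi hj
        have e1 : (((t.1 + dr).toNat : Nat) : Int) = t.1 + dr := by omega
        have e2 : (((t.2.1 + dc).toNat : Nat) : Int) = t.2.1 + dc := by omega
        rw [e1, e2] at hfit
        rw [show t.1 + dr - dr = t.1 by ring, show t.2.1 + dc - dc = t.2.1 by ring] at hfit
        rw [if_pos ⟨hp.1, hp.2, hq.1, hq.2⟩, ← hv] at hfit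
        have hlk : cellA lock (t.1 + dr).toNat (t.2.1 + dc).toNat = cellB lock (t.1 + dr) (t.2.1 + dc) := by
          rw [← cellB_natCast, e1, e2]
        rw [hlk] at hfit
        rw [needB_get?, if_pos ⟨hb.1, hb.2.1, hb.2.2.1, hb.2.2.2, by intro hh; rw [hh] at hfit; omega⟩]
        congr 1
        omega
      · left
        tauto

-- the two sides' key matrices agree on the kl × kl square
def MatEq (kl : Nat) (K K' : List (List Int)) : Prop :=
  ∀ p q : Nat, p < kl → q < kl → cellA K p q = cellA K' p q
theorem fits_congr (K K' lock : List (List Int)) (kl ll : Nat) (dr dc : Int)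
    (h : MatEq kl K K') : Fits K lock kl ll dr dc ↔ Fits K' lock kl ll dr dc := by
  have key : ∀ i j : Nat, i < ll → j < ll →
      (if 0 ≤ (i : Int) - dr ∧ (i : Int) - dr < (kl : Int) ∧ 0 ≤ (j : Int) - dc ∧ (j : Int) - dc < (kl : Int)
       then cellB K ((i : Int) - dr) ((j : Int) - dc) else 0)
      = (if 0 ≤ (i : Int) - dr ∧ (i : Int) - dr < (kl : Int) ∧ 0 ≤ (j : Int) - dc ∧ (j : Int) - dc < (kl : Int)
         then cellB K' ((i : Int) - dr) ((j : Int) - dc) else 0) := by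
    intro i j hi hj
    split_ifs with hcnd
    · show cellA K ((i : Int) - dr).toNat ((j : Int) - dc).toNat
        = cellA K' ((i : Int) - dr).toNat ((j : Int) - dc).toNat
      exact h _ _ (by omega) (by omega)
    · rfl
  unfold Fits
  constructor
  · intro hf i j hi hj
    rw [← key i j hi hj]
    exact hf i j hi hj
  · intro hf i j hi hj
    rw [key i j hi hj]
    exact hf i j hi hj

theorem cell_rotB (rot : List (List Int)) (kl p q : Nat) (hp : p < kl) (hq : q < kl) :
    cellA (rotB rot (kl : Int)) p q = cellA rot (kl - 1 - q) p := by
  unfold rotB cellA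
  rw [PySem.List.pyRange_zero_natCast, List.map_map]
  rw [PySem.List.getD_map_range _ _ _ _ hp]
  simp only [Function.comp_apply]
  rw [List.map_map, PySem.List.getD_map_range _ _ _ _ hq]
  simp only [Function.comp_apply]
  show cellA rot ((kl : Int) - 1 - (q : Int)).toNat ((p : Nat) : Int).toNat = _
  congr 1
  omega

theorem matEq_turn (key rot : List (List Int)) (kl : Nat) (h : MatEq kl key rot) :
    MatEq kl (turnA key kl) (rotB rot (kl : Int)) := by
  intro p q hp hq
  rw [cell_turnA key kl p q hp hq, cell_rotB rot kl p q hp hq]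
  exact h (kl - 1 - q) p (by omega) hp

theorem goA_eq_goB (lock : List (List Int)) (kl ll : Nat) (hkl : kl ≤ ll) (hll : lock.length = ll)
    (n : Nat) (key rot board : List (List Int)) (hmat : MatEq kl key rot)
    (hb : BoardOK board kl ll) :
    goA lock kl ll n key board = goB (needB lock (ll : Int)) (kl : Int) (ll : Int) n rot := by
  induction n generalizing key rot board with
  | zero => rfl
  | succ m ih =>
    rw [goA, goB]
    have hcond : winA (fillA board key kl ll) lock kl ll
        = ((PySem.List.pyRange (1 - (kl : Int)) (ll : Int) 1).any fun dr =>
            (PySem.List.pyRange (1 - (kl : Int)) (ll : Int) 1).any fun dc =>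
              okB (needB lock (ll : Int)) rot (ptsB rot (kl : Int)) (kl : Int) (ll : Int) dr dc) := by
      rw [Bool.eq_iff_iff]
      have hcell : ∀ a b : Nat, cellA (fillA board key kl ll) a b =
          if ll ≤ a ∧ a < ll + kl ∧ ll ≤ b ∧ b < ll + kl then cellA key (a - ll) (b - ll) else 0 := by
        intro a b
        rw [cell_fillA board key kl ll hkl hb.1 hb.2.1]
        split_ifs with hx
        · rfl
        · exact hb.2.2 a b hx
      rw [winA_eq_fits (fillA board key kl ll) key lock kl ll hkl hll (boardOK_fillA board key kl ll hkl hb) hcell]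
      simp only [List.any_eq_true, PySem.List.mem_pyRange_one]
      constructor
      · rintro ⟨dr, dc, hdr, hdc, hf⟩
        exact ⟨dr, ⟨hdr.1, hdr.2⟩, dc, ⟨hdc.1, hdc.2⟩,
          (okB_eq_fits rot lock kl ll dr dc).mpr ((fits_congr key rot lock kl ll dr dc hmat).mp hf)⟩
      · rintro ⟨dr, hdr, dc, hdc, hok⟩
        exact ⟨dr, dc, ⟨hdr.1, hdr.2⟩, ⟨hdc.1, hdc.2⟩,
          (fits_congr key rot lock kl ll dr dc hmat).mpr ((okB_eq_fits rot lock kl ll dr dc).mp hok)⟩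
    rw [hcond]
    by_cases hwin : ((PySem.List.pyRange (1 - (kl : Int)) (ll : Int) 1).any fun dr =>
        (PySem.List.pyRange (1 - (kl : Int)) (ll : Int) 1).any fun dc =>
          okB (needB lock (ll : Int)) rot (ptsB rot (kl : Int)) (kl : Int) (ll : Int) dr dc) = true
    · rw [hwin]
      simp
    · rw [Bool.not_eq_true] at hwin
      rw [hwin]
      simp only [Bool.false_eq_true, if_false]
      exact ih (turnA key kl) (rotB rot (kl : Int)) (fillA board key kl ll)
        (matEq_turn key rot kl hmat) (boardOK_fillA board key kl ll hkl hb)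

theorem solution_eq (key lock : List (List Int)) (h : Pre_solution key lock) :
    solution key lock = solution_alt key lock := by
  unfold solution solution_alt
  have hmat : MatEq key.length key
      ((PySem.List.pyRange 0 (key.length : Int) 1).map fun p =>
        (PySem.List.pyRange 0 (key.length : Int) 1).map fun q => cellB key p q) := by
    intro p q hp hq
    unfold cellA
    rw [PySem.List.pyRange_zero_natCast, List.map_map]
    rw [PySem.List.getD_map_range _ _ _ _ hp]
    simp only [Function.comp_apply]
    rw [List.map_map, PySem.List.getD_map_range _ _ _ _ hq]
    simp only [Function.comp_apply]
    rfl
  exact goA_eq_goB lock key.length lock.length h.1 rfl 4 key _ _ hmat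
    (boardOK_init key.length lock.length)

-- ===== VERDICT (by name: the statement is the Claim_ definition above) =====
theorem solution_spec : Claim_equal_solution := by
  intro key lock _ hpre
  unfold Spec_solution
  exact solution_eq key lock hpre
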